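-- pv_equiv track=rewrite | github.com/BlackChesire/PycharmProjects | Shimon_Labs/isAccumulative.py | isAccumulative
-- ===== SOURCE A (Python) =====
-- def isAccumulative(lst):
-- 	# small series are not accumulative
-- 	if len(lst)<3:
-- 		return 0
--
-- 	# stopping condition
-- 	if len(lst)==3:
-- 		return (1 if lst[0]+lst[1]==lst[2] else 0)
--
-- 	# recursive check
-- 	if (lst[0]+lst[1]==lst[2] and isAccumulative(lst[1:])):
-- 		return 1
--
-- 	return 0
-- ===== SOURCE B (Python) =====
-- def isAccumulative(lst):
--     if len(lst) < 3:
--         return 0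
--     return int(all(a + b == c for a, b, c in zip(lst, lst[1:], lst[2:])))
-- ===== Notes on version B (the rewrite author's own statement) =====
-- stated objective: simpler
-- what changed: Replaced the slice-based recursion with a single non-recursive pass: int(all(a+b==c for a,b,c in zip(lst, lst[1:], lst[2:]))).
import Mathlib
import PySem

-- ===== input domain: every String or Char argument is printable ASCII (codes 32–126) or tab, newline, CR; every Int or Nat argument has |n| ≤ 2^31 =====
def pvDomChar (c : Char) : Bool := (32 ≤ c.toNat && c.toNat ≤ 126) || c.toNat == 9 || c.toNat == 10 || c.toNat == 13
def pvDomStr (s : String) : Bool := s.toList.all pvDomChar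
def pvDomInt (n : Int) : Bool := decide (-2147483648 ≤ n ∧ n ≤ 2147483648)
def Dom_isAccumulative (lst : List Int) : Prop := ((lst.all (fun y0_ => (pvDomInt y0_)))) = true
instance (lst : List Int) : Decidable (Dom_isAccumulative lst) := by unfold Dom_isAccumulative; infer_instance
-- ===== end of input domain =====

-- B replaces A's re-slicing recursion with a single non-recursive zip pass over consecutive triples (simpler).

-- ===== PORT A =====
-- A recurses on lst[1:]; the match on a::b::c::rest exposes len(lst)>=3, rest=[] is len(lst)==3,
-- b::c::rest is lst[1:]; the 'and' tests the recursive int result for truthiness (≠ 0).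
def isAccumulative : List Int → Int
  | [] => 0
  | [_] => 0
  | [_, _] => 0
  | a :: b :: c :: rest =>
    if rest = [] then (if a + b = c then 1 else 0)
    else if a + b = c ∧ isAccumulative (b :: c :: rest) ≠ 0 then 1 else 0

-- ===== PORT B =====
-- zip(lst, lst[1:], lst[2:]) = List.zip lst (List.zip (lst.drop 1) (lst.drop 2)); int(all …) as if-then-else.
def isAccumulative_alt (lst : List Int) : Int :=
  if lst.length < 3 then 0
  else if (List.zip lst (List.zip (lst.drop 1) (lst.drop 2))).all
            (fun t => t.1 + t.2.1 = t.2.2) then 1 else 0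

-- ===== PRECONDITION & SPEC =====
def Spec_isAccumulative (lst : List Int) (out : Int) : Prop := out = isAccumulative_alt lst
instance (lst : List Int) (out : Int) : Decidable (Spec_isAccumulative lst out) := by unfold Spec_isAccumulative; infer_instance

-- ===== CLAIM (what is proved, stated in full; the proofs are below) =====
def Claim_equal_isAccumulative : Prop := ∀ (lst : List Int), Dom_isAccumulative lst → Spec_isAccumulative lst (isAccumulative lst)

-- ===== LEMMAS AND PROOFS =====

theorem alt_cons4 (a b c d : Int) (rest : List Int) :
    isAccumulative_alt (a :: b :: c :: d :: rest) =
      if a + b = c ∧ isAccumulative_alt (b :: c :: d :: rest) ≠ 0 then 1 else 0 := by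
  simp only [isAccumulative_alt, List.drop, List.zip_cons_cons, List.all_cons]
  by_cases h : a + b = c <;> split_ifs <;> simp_all <;> omega

theorem isAccumulative_eq_alt : ∀ (lst : List Int), isAccumulative lst = isAccumulative_alt lst
  | [] => rfl
  | [_] => rfl
  | [_, _] => rfl
  | [a, b, c] => by
      simp only [isAccumulative, isAccumulative_alt]
      by_cases h : a + b = c <;> simp [h]
  | a :: b :: c :: d :: rest => by
      have ih := isAccumulative_eq_alt (b :: c :: d :: rest)
      conv_lhs => rw [isAccumulative]
      rw [alt_cons4, if_neg (by simp : ¬(d :: rest = []))]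
      simp only [ih]
termination_by lst => lst.length

-- ===== VERDICT (by name: the statement is the Claim_ definition above) =====
theorem isAccumulative_spec : Claim_equal_isAccumulative := by
  intro lst _
  unfold Spec_isAccumulative
  exact isAccumulative_eq_alt lst
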